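-- pv_equiv track=rewrite | github.com/zhangandin/ocr_invoice | slim/main_debug.py | sparse_tuple_to
-- ===== SOURCE A (Python) =====
-- def sparse_tuple_to(tuple_input, max_len):
--     indices = tuple_input[0]
--     values = tuple_input[1]
--     results = []
--     size = len(indices)
--     i = 0
--     while i < size:
--         index = indices[i][0]
--         item = []
--         j = i
--         next_index = indices[j][0]
--         while next_index == index:
--             item.append(values[j])
--             j += 1
--             if j == size:
--                 break
--             next_index = indices[j][0]
--         results.append(item)
--         i = j
--     while len(results) < max_len:
--         results.append([])
--     return results
-- ===== SOURCE B (Python) =====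
-- def sparse_tuple_to(tuple_input, max_len):
--     indices = tuple_input[0]
--     values = tuple_input[1]
--     results = []
--     prev = None
--     for idx, v in zip(indices, values):
--         if results and prev == idx[0]:
--             results[-1].append(v)
--         else:
--             results.append([v])
--         prev = idx[0]
--     results += [[] for _ in range(max_len - len(results))]
--     return results
-- ===== Notes on version B (the rewrite author's own statement) =====
-- stated objective: simpler
-- what changed: Replaced the nested two-pointer while-scan with a single zip pass that appends the value to the last group when the row index repeats consecutively (else opens a new group), and replaced the padding while-loop with a comprehension append.
import Mathlib
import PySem

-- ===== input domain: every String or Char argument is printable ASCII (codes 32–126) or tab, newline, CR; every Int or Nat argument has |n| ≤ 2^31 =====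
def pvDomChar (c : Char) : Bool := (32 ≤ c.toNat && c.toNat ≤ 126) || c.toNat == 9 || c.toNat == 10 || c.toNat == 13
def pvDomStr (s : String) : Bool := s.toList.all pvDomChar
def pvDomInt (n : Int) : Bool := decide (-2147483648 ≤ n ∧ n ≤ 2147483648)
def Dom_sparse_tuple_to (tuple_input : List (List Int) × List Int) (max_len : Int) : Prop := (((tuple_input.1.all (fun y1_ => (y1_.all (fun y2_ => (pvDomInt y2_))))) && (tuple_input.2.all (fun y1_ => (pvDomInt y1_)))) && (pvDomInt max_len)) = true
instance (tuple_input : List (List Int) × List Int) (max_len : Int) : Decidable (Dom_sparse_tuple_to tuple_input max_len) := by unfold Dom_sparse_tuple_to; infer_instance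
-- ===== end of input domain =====

-- B replaces A's nested two-pointer while-scan by a single zip pass that extends the last
-- group on a consecutive repeat of the row index (objective: simpler); return values proved equal on Pre_.

-- ===== PORT A =====
-- inner while loop of A: entered at position j with next_index == index already established;
-- appends values[j], advances j, breaks at size or at a new row index.  The fuel argument is
-- only a structural-termination guard (the loop runs at most size - j times; callers pass
-- enough fuel, so the 0 branch is never taken on entry with j < size); out-of-range /
-- empty-row accesses (where Python raises, excluded by Pre_) are made total with getD/headD.
def pvA_inner (indices : List (List Int)) (values : List Int) (size : Nat) (index : Int) : Nat → Nat → List Int → List Int × Nat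
  | 0, j, item => (item, j)
  | fuel + 1, j, item =>
    let item' := item ++ [values.getD j 0]
    let j' := j + 1
    if j' < size then
      let next := (indices.getD j' []).headD 0
      if next = index then pvA_inner indices values size index fuel j' item'
      else (item', j')
    else (item', j')

-- outer while loop of A (fuel = structural-termination guard; i strictly increases each
-- iteration, so fuel = size suffices and the 0 branch is only reached with i = size)
def pvA_outer (indices : List (List Int)) (values : List Int) (size : Nat) : Nat → Nat → List (List Int) → List (List Int)
  | 0, _, results => results
  | fuel + 1, i, results =>
    if i < size then
      let index := (indices.getD i []).headD 0
      let r := pvA_inner indices values size index (size - i) i []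
      pvA_outer indices values size fuel r.2 (results ++ [r.1])
    else results

-- trailing pad loop of A (fuel = number of iterations left, a termination guard)
def pvA_pad (max_len : Int) : Nat → List (List Int) → List (List Int)
  | 0, results => results
  | fuel + 1, results =>
    if (results.length : Int) < max_len then pvA_pad max_len fuel (results ++ [[]])
    else results

def sparse_tuple_to (tuple_input : List (List Int) × List Int) (max_len : Int) : List (List Int) :=
  let indices := tuple_input.1
  let values := tuple_input.2
  let size := indices.length
  let results := pvA_outer indices values size size 0 []
  pvA_pad max_len (max_len - results.length).toNat results

-- ===== PORT B =====
-- one step of B's zip pass: extend the last group iff the previous row index repeats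
def pvB_step (st : List (List Int) × Option Int) (p : List Int × Int) : List (List Int) × Option Int :=
  let key := p.1.headD 0
  if st.1 ≠ [] ∧ st.2 = some key then
    (st.1.dropLast ++ [(st.1.getLast?.getD []) ++ [p.2]], some key)
  else (st.1 ++ [[p.2]], some key)

def sparse_tuple_to_alt (tuple_input : List (List Int) × List Int) (max_len : Int) : List (List Int) :=
  let results := ((List.zip tuple_input.1 tuple_input.2).foldl pvB_step ([], none)).1
  results ++ List.replicate (max_len - results.length).toNat []

-- ===== PRECONDITION & SPEC =====
-- exactly the inputs on which Python A returns: it reads indices[j][0] and values[j] for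
-- every j < len(indices), so it raises (IndexError) iff some row of indices is empty or
-- values is shorter than indices.
def Pre_sparse_tuple_to (tuple_input : List (List Int) × List Int) (max_len : Int) : Prop :=
  (∀ l ∈ tuple_input.1, l ≠ []) ∧ tuple_input.1.length ≤ tuple_input.2.length
instance (tuple_input : List (List Int) × List Int) (max_len : Int) : Decidable (Pre_sparse_tuple_to tuple_input max_len) := by unfold Pre_sparse_tuple_to; infer_instance

def pvWitness_sparse_tuple_to : (List (List Int) × List Int) × Int := (([[0, 2], [0, 5], [1, 1]], [7, 8, 9]), 5)

def Spec_sparse_tuple_to (tuple_input : List (List Int) × List Int) (max_len : Int) (out : List (List Int)) : Prop := out = sparse_tuple_to_alt tuple_input max_len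
instance (tuple_input : List (List Int) × List Int) (max_len : Int) (out : List (List Int)) : Decidable (Spec_sparse_tuple_to tuple_input max_len out) := by unfold Spec_sparse_tuple_to; infer_instance

-- ===== CLAIM (what is proved, stated in full; the proofs are below) =====
def Claim_equal_sparse_tuple_to : Prop := ∀ (tuple_input : List (List Int) × List Int) (max_len : Int), Dom_sparse_tuple_to tuple_input max_len → Pre_sparse_tuple_to tuple_input max_len → Spec_sparse_tuple_to tuple_input max_len (sparse_tuple_to tuple_input max_len)

-- ===== LEMMAS AND PROOFS =====

theorem pvA_pad_eq (max_len : Int) :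
    ∀ (fuel : Nat) (results : List (List Int)),
      (max_len - (results.length : Int)).toNat ≤ fuel →
      pvA_pad max_len fuel results =
        results ++ List.replicate (max_len - (results.length : Int)).toNat [] := by
  intro fuel
  induction fuel with
  | zero =>
    intro results hf
    have h0 : (max_len - (results.length : Int)).toNat = 0 := by omega
    simp [pvA_pad, h0]
  | succ fuel ih =>
    intro results hf
    rw [pvA_pad]
    by_cases h : (results.length : Int) < max_len
    · rw [if_pos h, ih (results ++ [[]]) (by simp; omega)]
      have : (max_len - (results.length : Int)).toNat =
          (max_len - ((results ++ [([] : List Int)]).length : Int)).toNat + 1 := by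
        simp; omega
      rw [this, List.replicate_succ]
      simp
    · rw [if_neg h]
      have h0 : (max_len - (results.length : Int)).toNat = 0 := by omega
      simp [h0]

-- loop invariant of A's inner while loop against B's fold, stated at loop entry
theorem pvA_inner_spec (indices : List (List Int)) (values : List Int) (size : Nat)
    (hsz : size = indices.length) (hlen : indices.length ≤ values.length)
    (index : Int) :
    ∀ (fuel j : Nat) (item : List Int) (results : List (List Int)),
      size - j ≤ fuel → j < size → (indices.getD j []).headD 0 = index →
    (j < (pvA_inner indices values size index fuel j item).2 ∧
      (pvA_inner indices values size index fuel j item).2 ≤ size ∧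
      ((pvA_inner indices values size index fuel j item).2 = size ∨
        (indices.getD (pvA_inner indices values size index fuel j item).2 []).headD 0 ≠ index)) ∧
    ((List.zip indices values).drop j).foldl pvB_step (results ++ [item], some index) =
      ((List.zip indices values).drop (pvA_inner indices values size index fuel j item).2).foldl
        pvB_step (results ++ [(pvA_inner indices values size index fuel j item).1], some index) := by
  intro fuel
  induction fuel with
  | zero => intro j item results hn hj _; omega
  | succ fuel ih =>
    intro j item results hn hj hkey
    have hjlen : j < (indices.zip values).length := by
      rw [List.length_zip]; omega
    have hzj : (indices.zip values)[j]'hjlen = (indices.getD j [], values.getD j 0) := by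
      rw [List.getElem_zip, List.getD_eq_getElem _ _ (by omega), List.getD_eq_getElem _ _ (by omega)]
    have hstep : ∀ res : List (List Int),
        ((indices.zip values).drop j).foldl pvB_step (res ++ [item], some index) =
        ((indices.zip values).drop (j + 1)).foldl pvB_step
          (res ++ [item ++ [values.getD j 0]], some index) := by
      intro res
      rw [List.drop_eq_getElem_cons hjlen, List.foldl_cons, hzj]
      have hk2 : ((indices.getD j [], values.getD j 0) : List Int × Int).1.headD 0 = index := hkey
      have : pvB_step (res ++ [item], some index) (indices.getD j [], values.getD j 0) =
          (res ++ [item ++ [values.getD j 0]], some index) := by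
        simp only [pvB_step]
        have hk3 : (indices[j]?.getD []).head?.getD 0 = index := by simpa using hk2
        rw [if_pos ⟨by simp, by rw [hk2]⟩]
        simp [hk3]
      rw [this]
    rw [pvA_inner]
    by_cases h1 : j + 1 < size
    · by_cases h2 : (indices.getD (j + 1) []).headD 0 = index
      · simp only [h1, h2, if_pos]
        have := ih (j + 1) (item ++ [values.getD j 0]) results (by omega) h1 h2
        refine ⟨⟨by omega, this.1.2.1, this.1.2.2⟩, ?_⟩
        rw [hstep]
        exact this.2
      · simp only [h1, h2, if_pos, if_neg, not_false_iff]
        exact ⟨⟨by omega, by omega, Or.inr h2⟩, hstep results⟩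
    · simp only [h1, if_neg, not_false_iff]
      exact ⟨⟨by omega, by omega, Or.inl (by omega)⟩, hstep results⟩

-- outer loop of A against B's fold
theorem pvA_outer_spec (indices : List (List Int)) (values : List Int) (size : Nat)
    (hsz : size = indices.length) (hlen : indices.length ≤ values.length) :
    ∀ (fuel i : Nat) (results : List (List Int)) (prev : Option Int),
      size - i ≤ fuel → i ≤ size →
      (i = size ∨ results = [] ∨ prev ≠ some ((indices.getD i []).headD 0)) →
    pvA_outer indices values size fuel i results =
      (((List.zip indices values).drop i).foldl pvB_step (results, prev)).1 := by
  intro fuel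
  induction fuel with
  | zero =>
    intro i results prev hn hi hstart
    have hie : i = size := by omega
    rw [pvA_outer, List.drop_eq_nil_of_le (by rw [List.length_zip]; omega), List.foldl_nil]
  | succ fuel ih =>
    intro i results prev hn hi hstart
    rw [pvA_outer]
    by_cases h : i < size
    · simp only [h, if_pos]
      set index := (indices.getD i []).headD 0 with hidx
      have hinner := pvA_inner_spec indices values size hsz hlen index (size - i) i [] results
        (by omega) h rfl
      have hjlen : i < (indices.zip values).length := by rw [List.length_zip]; omega
      have hzj : (indices.zip values)[i]'hjlen = (indices.getD i [], values.getD i 0) := by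
        rw [List.getElem_zip, List.getD_eq_getElem _ _ (by omega), List.getD_eq_getElem _ _ (by omega)]
      -- both start states do the same first step at position i
      have hbridge : ((indices.zip values).drop i).foldl pvB_step (results, prev) =
          ((indices.zip values).drop i).foldl pvB_step (results ++ [[]], some index) := by
        rw [List.drop_eq_getElem_cons hjlen, List.foldl_cons, List.foldl_cons, hzj]
        have hleft : pvB_step (results, prev) (indices.getD i [], values.getD i 0) =
            (results ++ [[values.getD i 0]], some index) := by
          rcases hstart with h0 | h0 | h0
          · omega
          · simp [pvB_step, h0, hidx]
          · simp only [pvB_step, ← hidx]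
            rw [if_neg (by intro hc; exact h0 hc.2)]
        have hright : pvB_step (results ++ [[]], some index) (indices.getD i [], values.getD i 0) =
            (results ++ [[values.getD i 0]], some index) := by
          simp [pvB_step, hidx]
        rw [hleft, hright]
      rw [hbridge, hinner.2]
      obtain ⟨⟨hlt, hle, hend⟩, _⟩ := hinner
      rw [ih (pvA_inner indices values size index (size - i) i []).2
        (results ++ [(pvA_inner indices values size index (size - i) i []).1]) (some index)
        (by omega) hle ?_]
      rcases hend with he | he
      · exact Or.inl he
      · refine Or.inr (Or.inr ?_)
        intro hc
        exact he (Option.some.injEq _ _ ▸ (by simpa using hc.symm))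
    · simp only [h, if_neg, not_false_iff]
      have hie : i = size := by omega
      rw [List.drop_eq_nil_of_le (by rw [List.length_zip]; omega), List.foldl_nil]

-- ===== VERDICT (by name: the statement is the Claim_ definition above) =====
theorem sparse_tuple_to_spec : Claim_equal_sparse_tuple_to := by
  intro tin max_len _ hpre
  show pvA_pad max_len (max_len - (pvA_outer tin.1 tin.2 tin.1.length tin.1.length 0 []).length).toNat
      (pvA_outer tin.1 tin.2 tin.1.length tin.1.length 0 []) = _
  have h := pvA_outer_spec tin.1 tin.2 tin.1.length rfl hpre.2 tin.1.length 0 [] none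
    (by omega) (by omega) (by
      rcases Nat.eq_zero_or_pos tin.1.length with h | h
      · exact Or.inl h.symm
      · exact Or.inr (Or.inl rfl))
  simp only [List.drop_zero] at h
  rw [h, pvA_pad_eq max_len _ _ le_rfl]
  rfl
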